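-- pv_equiv track=rewrite | github.com/Jonnygeo/divine-mirror | divine_synthesis_engine.py | build_analysis_section
-- ===== SOURCE A (Python) =====
-- from collections import defaultdict
--
-- def build_analysis_section(citations, universal_themes, template):
--     """Build the analysis section showing citation evidence"""
--     analysis_lines = []
--
--     # Group citations by tradition
--     by_tradition = defaultdict(list)
--     for citation in citations:
--         tradition = citation.get('tradition', 'Unknown')
--         by_tradition[tradition].append(citation)
--
--     # Present evidence by tradition
--     for tradition, tradition_citations in by_tradition.items():
--         analysis_lines.append(f"**{tradition}**:")
--         for citation in tradition_citations[:2]:  # Max 2 per tradition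
--             verse = citation.get('verse', 'Unknown reference')
--             text = citation.get('text', '')[:200] + "..." if len(citation.get('text', '')) > 200 else citation.get('text', '')
--             analysis_lines.append(f"  - {verse}: \"{text}\"")
--
--     return "\n".join(analysis_lines)
-- ===== SOURCE B (Python) =====
-- def build_analysis_section(citations, universal_themes, template):
--     """Build the analysis section showing citation evidence.
--
--     Alternative decomposition: instead of building a tradition -> citations
--     index, collect the distinct traditions in first-appearance order, then
--     re-scan the citation list once per tradition, stopping after two matches.
--     """
--     order = []
--     for citation in citations:
--         tradition = citation.get('tradition', 'Unknown')
--         if tradition not in order: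
--             order.append(tradition)
--
--     lines = []
--     for tradition in order:
--         lines.append(f"**{tradition}**:")
--         shown = 0
--         for citation in citations:
--             if shown == 2:
--                 break
--             if citation.get('tradition', 'Unknown') == tradition:
--                 verse = citation.get('verse', 'Unknown reference')
--                 text = citation.get('text', '')
--                 if len(text) > 200:
--                     text = text[:200] + "..."
--                 lines.append(f"  - {verse}: \"{text}\"")
--                 shown += 1
--     return "\n".join(lines)
-- ===== Notes on version B (the rewrite author's own statement) =====
-- stated objective: alternative
-- what changed: B drops the defaultdict grouping index: it collects the distinct traditions in first-appearance order, then re-scans the full citation list once per tradition with an early break after two matches, formatting as it goes.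
import Mathlib
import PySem

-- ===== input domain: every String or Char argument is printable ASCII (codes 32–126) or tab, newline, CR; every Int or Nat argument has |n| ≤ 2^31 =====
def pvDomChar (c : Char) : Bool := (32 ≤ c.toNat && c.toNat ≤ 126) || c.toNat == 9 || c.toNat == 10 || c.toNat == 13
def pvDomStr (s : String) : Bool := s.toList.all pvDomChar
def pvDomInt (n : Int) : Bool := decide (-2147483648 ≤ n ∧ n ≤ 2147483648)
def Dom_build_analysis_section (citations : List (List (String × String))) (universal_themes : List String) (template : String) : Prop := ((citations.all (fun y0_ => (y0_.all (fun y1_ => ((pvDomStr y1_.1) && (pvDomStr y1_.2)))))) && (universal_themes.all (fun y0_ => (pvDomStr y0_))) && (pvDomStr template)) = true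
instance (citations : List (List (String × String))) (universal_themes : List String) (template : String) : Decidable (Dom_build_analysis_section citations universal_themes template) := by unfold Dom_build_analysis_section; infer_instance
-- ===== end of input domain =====

-- B replaces A's defaultdict grouping by a first-appearance tradition list plus a
-- per-tradition rescan of the citations (break after two matches); same output, proved equal.


-- ===== PORT A =====
def build_analysis_section (citations : List (List (String × String))) (universal_themes : List String) (template : String) : String :=
  -- by_tradition = defaultdict(list); by_tradition[tradition].append(citation)
  let by_tradition : PySem.Dict String (List (List (String × String))) :=
    citations.foldl
      (fun d citation =>
        d.modify ((PySem.Dict.mk citation).getD "tradition" "Unknown") [] (fun g => g ++ [citation]))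
      PySem.Dict.empty
  let analysis_lines : List String :=
    by_tradition.items.foldl
      (fun analysis_lines p =>
        let analysis_lines := analysis_lines ++ ["**" ++ p.1 ++ "**:"]
        (PySem.List.slice p.2 none (some 2)).foldl
          (fun analysis_lines citation =>
            let verse := (PySem.Dict.mk citation).getD "verse" "Unknown reference"
            let text :=
              if PySem.Str.len ((PySem.Dict.mk citation).getD "text" "") > 200 then
                PySem.Str.slice ((PySem.Dict.mk citation).getD "text" "") none (some 200) ++ "..."
              else (PySem.Dict.mk citation).getD "text" ""
            analysis_lines ++ ["  - " ++ verse ++ ": \"" ++ text ++ "\""])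
          analysis_lines)
      []
  PySem.Str.join "\n" analysis_lines

-- ===== PORT B =====
-- format one citation line (verse + possibly truncated text)
def pvB_fmt (citation : List (String × String)) : String :=
  let verse := (PySem.Dict.mk citation).getD "verse" "Unknown reference"
  let text0 := (PySem.Dict.mk citation).getD "text" ""
  let text := if PySem.Str.len text0 > 200 then PySem.Str.slice text0 none (some 200) ++ "..." else text0
  "  - " ++ verse ++ ": \"" ++ text ++ "\""

-- inner rescan loop of Source B: append matching citations' lines, break once shown == 2
def pvB_scan (lines : List String) (cs : List (List (String × String))) (tradition : String) (shown : Int) : List String :=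
  match cs with
  | [] => lines
  | citation :: rest =>
    if shown == 2 then lines
    else if ((PySem.Dict.mk citation).getD "tradition" "Unknown") == tradition then
      pvB_scan (lines ++ [pvB_fmt citation]) rest tradition (shown + 1)
    else
      pvB_scan lines rest tradition shown

def build_analysis_section_alt (citations : List (List (String × String))) (universal_themes : List String) (template : String) : String :=
  let order : List String :=
    citations.foldl
      (fun order citation => PySem.Set.add order ((PySem.Dict.mk citation).getD "tradition" "Unknown")) []
  let lines : List String :=
    order.foldl (fun lines tradition => pvB_scan (lines ++ ["**" ++ tradition ++ "**:"]) citations tradition 0) []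
  PySem.Str.join "\n" lines

-- ===== PRECONDITION & SPEC =====
def Spec_build_analysis_section (citations : List (List (String × String))) (universal_themes : List String) (template : String) (out : String) : Prop := out = build_analysis_section_alt citations universal_themes template
instance (citations : List (List (String × String))) (universal_themes : List String) (template : String) (out : String) : Decidable (Spec_build_analysis_section citations universal_themes template out) := by unfold Spec_build_analysis_section; infer_instance

-- ===== CLAIM (what is proved, stated in full; the proofs are below) =====
def Claim_equal_build_analysis_section : Prop := ∀ (citations : List (List (String × String))) (universal_themes : List String) (template : String), Dom_build_analysis_section citations universal_themes template → Spec_build_analysis_section citations universal_themes template (build_analysis_section citations universal_themes template)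

-- ===== LEMMAS AND PROOFS =====

-- the tradition key both programs group/scan by
def pvKey (citation : List (String × String)) : String :=
  (PySem.Dict.mk citation).getD "tradition" "Unknown"

-- common normal form: for each distinct tradition in first-appearance order,
-- a header line followed by the formatted first two matching citations
def pvSpecLines (citations : List (List (String × String))) : List String :=
  (PySem.Set.ofList (citations.map pvKey)).foldl
    (fun lines t =>
      lines ++ ("**" ++ t ++ "**:") :: ((citations.filter (fun c => pvKey c == t)).take 2).map pvB_fmt)
    []

theorem pvB_scan_eq (cs : List (List (String × String))) (tradition : String) :
    ∀ (lines : List String) (n : Int), 0 ≤ n → n ≤ 2 →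
    pvB_scan lines cs tradition n =
      lines ++ ((cs.filter (fun c => pvKey c == tradition)).take (2 - n).toNat).map pvB_fmt := by
  induction cs with
  | nil => intro lines n _ _; simp [pvB_scan]
  | cons c rest ih =>
    intro lines n h0 h2
    by_cases hn : n = 2
    · subst hn; simp [pvB_scan]
    · have hne : (n == 2) = false := by simp [hn]
      cases hm : ((PySem.Dict.mk c).getD "tradition" "Unknown") == tradition with
      | true =>
        have hT : (2 - n).toNat = (2 - (n + 1)).toNat + 1 := by omega
        rw [show pvB_scan lines (c :: rest) tradition n
              = pvB_scan (lines ++ [pvB_fmt c]) rest tradition (n + 1) from by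
            simp [pvB_scan, hne, hm]]
        rw [ih (lines ++ [pvB_fmt c]) (n + 1) (by omega) (by omega)]
        simp [List.filter_cons, pvKey, hm, hT]
      | false =>
        rw [show pvB_scan lines (c :: rest) tradition n = pvB_scan lines rest tradition n from by
            simp [pvB_scan, hne, hm]]
        rw [ih lines n h0 h2]
        simp [List.filter_cons, pvKey, hm]

theorem pvA_eq (citations : List (List (String × String))) (universal_themes : List String) (template : String) :
    build_analysis_section citations universal_themes template = PySem.Str.join "\n" (pvSpecLines citations) := by
  simp only [build_analysis_section]
  set d : PySem.Dict String (List (List (String × String))) :=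
    citations.foldl
      (fun d citation =>
        d.modify ((PySem.Dict.mk citation).getD "tradition" "Unknown") [] (fun g => g ++ [citation]))
      PySem.Dict.empty with hd
  have hkeys : d.keys = PySem.Set.ofList (citations.map pvKey) := by
    have h1 := PySem.Dict.keys_foldl_modify_key citations pvKey [] (fun _ x g => g ++ [x])
      (PySem.Dict.empty : PySem.Dict String (List (List (String × String))))
    exact h1.trans (by rw [PySem.Dict.keys_empty]; rfl)
  have hnodup : d.keys.Nodup :=
    PySem.Dict.nodup_keys_foldl_modify_key citations pvKey [] (fun _ x g => g ++ [x]) _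
      PySem.Dict.nodup_keys_empty
  have hget : ∀ t, d.getD t [] = citations.filter (fun c => pvKey c == t) := by
    intro t
    have h2 : d = (citations.map (fun c => (pvKey c, c))).foldl
        (fun d p => d.modify p.1 [] (fun g => g ++ [p.2])) PySem.Dict.empty := by
      rw [hd, List.foldl_map]; rfl
    rw [h2, PySem.Dict.getD_foldl_modify_append]
    simp [List.filter_map, Function.comp_def]
  rw [PySem.Dict.items_eq_map_keys d hnodup [], List.foldl_map, hkeys]
  unfold pvSpecLines
  congr 1
  apply PySem.List.foldl_congr_mem
  intro lines t _
  rw [hget t, PySem.List.slice_to _ (by norm_num : (0:Int) ≤ 2)]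
  have hbody : (fun (analysis_lines : List String) citation =>
      analysis_lines ++ ["  - " ++ (PySem.Dict.mk citation).getD "verse" "Unknown reference" ++ ": \"" ++
        (if PySem.Str.len ((PySem.Dict.mk citation).getD "text" "") > 200 then
          PySem.Str.slice ((PySem.Dict.mk citation).getD "text" "") none (some 200) ++ "..."
        else (PySem.Dict.mk citation).getD "text" "") ++ "\""])
      = (fun acc citation => acc ++ [pvB_fmt citation]) := rfl
  rw [hbody, PySem.List.foldl_append_singleton_eq_map]
  simp

theorem pvB_eq (citations : List (List (String × String))) (universal_themes : List String) (template : String) :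
    build_analysis_section_alt citations universal_themes template = PySem.Str.join "\n" (pvSpecLines citations) := by
  simp only [build_analysis_section_alt]
  unfold pvSpecLines
  have horder : citations.foldl
      (fun order citation => PySem.Set.add order ((PySem.Dict.mk citation).getD "tradition" "Unknown")) []
      = PySem.Set.ofList (citations.map pvKey) := by
    simp only [PySem.Set.ofList, List.foldl_map]; rfl
  rw [horder]
  congr 1
  apply PySem.List.foldl_congr_mem
  intro lines t _
  rw [pvB_scan_eq citations t (lines ++ ["**" ++ t ++ "**:"]) 0 (by norm_num) (by norm_num)]
  simp

-- ===== VERDICT (by name: the statement is the Claim_ definition above) =====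
theorem build_analysis_section_spec : Claim_equal_build_analysis_section := by
  intro citations universal_themes template _
  unfold Spec_build_analysis_section
  rw [pvA_eq, pvB_eq]
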